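-- pv_equiv track=rewrite | github.com/patallen/floorcast | scripts/mermaid_layers.py | group_by_layer
-- ===== SOURCE A (Python) =====
-- LAYERS = {
--     "domain": "Domain",
--     "infrastructure": "Infrastructure",
--     "adapters": "Adapters",
--     "services": "Services",
--     "repositories": "Repositories",
--     "api": "API",
-- }
--
-- def get_layer(node: str) -> str | None:
--     """Get layer name for a node."""
--     if node.startswith("floorcast."):
--         parts = node.split(".")
--         if len(parts) >= 2:
--             return parts[1]
--     return None
--
-- def group_by_layer(nodes: set[str]) -> dict[str, list[str]]:
--     """Group nodes by layer."""
--     groups: dict[str, list[str]] = {layer: [] for layer in LAYERS}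
--     groups["other"] = []
--
--     for node in sorted(nodes):
--         layer = get_layer(node)
--         if layer in LAYERS:
--             groups[layer].append(node)
--         else:
--             groups["other"].append(node)
--
--     return groups
-- ===== SOURCE B (Python) =====
-- LAYERS = {
--     "domain": "Domain",
--     "infrastructure": "Infrastructure",
--     "adapters": "Adapters",
--     "services": "Services",
--     "repositories": "Repositories",
--     "api": "API",
-- }
--
--
-- def _node_layer(node):
--     """Bucket name for a node: a known layer, or 'other'."""
--     if node.startswith("floorcast."):
--         parts = node.split(".")
--         if len(parts) >= 2 and parts[1] in LAYERS:
--             return parts[1]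
--     return "other"
--
--
-- def group_by_layer(nodes):
--     """Group nodes by layer: one independent filter scan per layer key, no mutable buckets."""
--     snodes = sorted(nodes)
--     return {k: [n for n in snodes if _node_layer(n) == k] for k in (*LAYERS, "other")}
-- ===== Notes on version B (the rewrite author's own statement) =====
-- stated objective: alternative
-- what changed: A pre-initializes a mutable groups dict and makes one dispatch pass appending each sorted node into its bucket; B has no mutable buckets at all: it builds the result dict declaratively with one independent filter scan of the sorted list per layer key (7 scans, filter-per-key instead of dispatch-per-node).
import Mathlib
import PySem

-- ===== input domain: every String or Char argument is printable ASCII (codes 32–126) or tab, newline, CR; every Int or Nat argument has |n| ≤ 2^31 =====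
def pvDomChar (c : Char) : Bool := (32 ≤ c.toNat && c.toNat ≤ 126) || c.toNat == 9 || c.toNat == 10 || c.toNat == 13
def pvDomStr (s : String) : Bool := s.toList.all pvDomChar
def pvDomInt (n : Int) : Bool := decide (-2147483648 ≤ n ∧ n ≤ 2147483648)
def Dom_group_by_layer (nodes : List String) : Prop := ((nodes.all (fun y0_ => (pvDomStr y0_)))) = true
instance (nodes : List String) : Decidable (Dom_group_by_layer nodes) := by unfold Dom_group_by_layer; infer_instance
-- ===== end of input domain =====

-- B drops A's mutable groups dict and per-node dispatch loop entirely: it sorts once and builds the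
-- result declaratively, one independent filter scan of the sorted list per layer key (alternative
-- decomposition, same cost). Equivalence is about the returned dict (neither mutates its argument).

-- ===== PORT A =====
-- LAYERS is a module dict; group_by_layer/get_layer only ever use its KEYS ('layer in LAYERS',
-- 'for layer in LAYERS'), so it is ported as its key list (insertion order).
def pvLAYERS : List String :=
  ["domain", "infrastructure", "adapters", "services", "repositories", "api"]

def get_layer (node : String) : Option String :=
  if PySem.Str.startswith node "floorcast." then
    let parts : List String := (PySem.Str.split? node ".").getD []  -- sep "." ≠ "": split? is some, exact
    if 2 ≤ parts.length then some (parts.getD 1 "")  -- parts[1]: in range under the guard, exact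
    else none
  else none

def group_by_layer (nodes : List String) : List (String × List String) :=
  let groups : PySem.Dict String (List String) :=
    PySem.Dict.insert (PySem.Dict.ofList (pvLAYERS.map (fun l => (l, ([] : List String))))) "other" []
  let final := (PySem.List.sorted nodes (fun x => x) false).foldl
    (fun g node =>
      match get_layer node with
      | some layer =>
          if pvLAYERS.contains layer then
            -- groups[layer].append(node): layer is a key of groups here, so exact
            PySem.Dict.modify g layer [] (fun v => v ++ [node])
          else PySem.Dict.modify g "other" [] (fun v => v ++ [node])
      | none => PySem.Dict.modify g "other" [] (fun v => v ++ [node]))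
    groups
  final.items

-- ===== PORT B =====
def node_layer (node : String) : String :=
  if PySem.Str.startswith node "floorcast." then
    let parts : List String := (PySem.Str.split? node ".").getD []  -- sep "." ≠ "": split? is some, exact
    if 2 ≤ parts.length ∧ pvLAYERS.contains (parts.getD 1 "") then parts.getD 1 ""
    else "other"
  else "other"

def group_by_layer_alt (nodes : List String) : List (String × List String) :=
  let snodes := PySem.List.sorted nodes (fun x => x) false
  -- {k: [n for n in snodes if _node_layer(n) == k] for k in (*LAYERS, "other")}:
  -- the keys are distinct, so the comprehension's dict is this association list in key order.
  (pvLAYERS ++ ["other"]).map (fun k => (k, snodes.filter (fun n => node_layer n == k)))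

-- ===== PRECONDITION & SPEC =====
def Spec_group_by_layer (nodes : List String) (out : List (String × List String)) : Prop := out = group_by_layer_alt nodes
instance (nodes : List String) (out : List (String × List String)) : Decidable (Spec_group_by_layer nodes out) := by unfold Spec_group_by_layer; infer_instance

-- ===== CLAIM (what is proved, stated in full; the proofs are below) =====
def Claim_equal_group_by_layer : Prop := ∀ (nodes : List String), Dom_group_by_layer nodes → Spec_group_by_layer nodes (group_by_layer nodes)

-- ===== LEMMAS AND PROOFS =====

-- A's dispatch (match on get_layer, membership test) picks exactly the bucket node_layer names.
theorem stepA_eq (g : PySem.Dict String (List String)) (node : String) :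
    (match get_layer node with
      | some layer =>
          if pvLAYERS.contains layer then PySem.Dict.modify g layer [] (fun v => v ++ [node])
          else PySem.Dict.modify g "other" [] (fun v => v ++ [node])
      | none => PySem.Dict.modify g "other" [] (fun v => v ++ [node]))
    = PySem.Dict.modify g (node_layer node) [] (fun v => v ++ [node]) := by
  unfold get_layer node_layer
  split_ifs with h1
  · by_cases h2 : 2 ≤ ((PySem.Str.split? node ".").getD []).length
    · simp only [if_pos h2]
      split_ifs <;> simp_all
    · simp [h2]
  · rfl

-- A's grouping fold: each bucket collects its nodes in order.
theorem getD_fold (key : String → String) (xs : List String)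
    (d : PySem.Dict String (List String)) (k : String) :
    PySem.Dict.getD (xs.foldl (fun b n => PySem.Dict.modify b (key n) [] (fun v => v ++ [n])) d) k []
      = PySem.Dict.getD d k [] ++ xs.filter (fun n => key n == k) := by
  induction xs generalizing d with
  | nil => simp
  | cons n xs ih =>
    simp only [List.foldl_cons, List.filter_cons, ih]
    by_cases h : key n = k
    · simp [h, PySem.Dict.getD_modify_self]
    · simp [h, PySem.Dict.getD_modify, Ne.symm h]

-- Keys of the A-side fold result: unchanged (every node_layer lands on an existing key).
theorem keys_foldA (xs : List String) :
    (xs.foldl (fun b n => PySem.Dict.modify b (node_layer n) [] (fun v => v ++ [n]))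
      (PySem.Dict.insert (PySem.Dict.ofList (pvLAYERS.map (fun l => (l, ([] : List String))))) "other" [])).keys
    = pvLAYERS ++ ["other"] := by
  rw [PySem.Dict.keys_foldl_modify_key]
  have hbase : (PySem.Dict.insert (PySem.Dict.ofList (pvLAYERS.map (fun l => (l, ([] : List String))))) "other" []).keys
      = pvLAYERS ++ ["other"] := by decide
  rw [hbase]
  induction xs with
  | nil => rfl
  | cons n xs ih =>
    have hmem : node_layer n ∈ pvLAYERS ++ ["other"] := by
      unfold node_layer
      split_ifs with h1
      · dsimp only
        split_ifs with h2
        · exact List.mem_append_left _ (by simpa using h2.2)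
        · simp
      · simp
    simp only [PySem.Set.update, List.map_cons, List.foldl_cons] at *
    rw [PySem.Set.add_of_mem hmem]
    exact ih

-- Every value of the initial groups dict is [].
theorem getD_init (k : String) :
    PySem.Dict.getD
      (PySem.Dict.insert (PySem.Dict.ofList (pvLAYERS.map (fun l => (l, ([] : List String))))) "other" [])
      k [] = ([] : List String) := by
  cases h : PySem.Dict.get?
      (PySem.Dict.insert (PySem.Dict.ofList (pvLAYERS.map (fun l => (l, ([] : List String))))) "other" []) k with
  | none => simp [PySem.Dict.getD_eq_get?_getD, h]
  | some v =>
    have hm := PySem.Dict.mem_items_of_get?_eq_some _ h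
    have hitems : (PySem.Dict.insert (PySem.Dict.ofList (pvLAYERS.map (fun l => (l, ([] : List String))))) "other" []).items
        = (pvLAYERS.map (fun l => (l, ([] : List String)))) ++ [("other", [])] := by decide
    rw [hitems] at hm
    simp [pvLAYERS] at hm
    have hv : v = [] := by tauto
    simp [PySem.Dict.getD_eq_get?_getD, h, hv]

-- A's port, in closed form: each key paired with the matching nodes of the sorted list.
theorem portA_eq (nodes : List String) :
    group_by_layer nodes
      = (pvLAYERS ++ ["other"]).map
          (fun k => (k, (PySem.List.sorted nodes (fun x => x) false).filter (fun n => node_layer n == k))) := by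
  unfold group_by_layer
  have hstep : (fun (g : PySem.Dict String (List String)) node =>
      match get_layer node with
      | some layer =>
          if pvLAYERS.contains layer then PySem.Dict.modify g layer [] (fun v => v ++ [node])
          else PySem.Dict.modify g "other" [] (fun v => v ++ [node])
      | none => PySem.Dict.modify g "other" [] (fun v => v ++ [node]))
      = fun g node => PySem.Dict.modify g (node_layer node) [] (fun v => v ++ [node]) :=
    funext fun g => funext fun node => stepA_eq g node
  rw [hstep]
  have hnd : ((PySem.List.sorted nodes (fun x => x) false).foldl
      (fun b n => PySem.Dict.modify b (node_layer n) [] (fun v => v ++ [n]))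
      (PySem.Dict.insert (PySem.Dict.ofList (pvLAYERS.map (fun l => (l, ([] : List String))))) "other" [])).keys.Nodup := by
    rw [keys_foldA]; decide
  rw [PySem.Dict.items_eq_map_keys _ hnd [], keys_foldA]
  refine List.map_congr_left (fun k _ => ?_)
  rw [getD_fold, getD_init, List.nil_append]

-- ===== VERDICT (by name: the statement is the Claim_ definition above) =====
theorem group_by_layer_spec : Claim_equal_group_by_layer := by
  intro nodes _
  unfold Spec_group_by_layer group_by_layer_alt
  exact portA_eq nodes
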